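-- pv_equiv track=rewrite | github.com/charge1203/Algorithm | programmers/data structure/스택,큐_프로세스.py | solution
-- ===== SOURCE A (Python) =====
-- def solution(priorities, location):
--     loc = priorities.index(max(priorities))
--
--     for i in range(len(priorities)):
--         if loc >= len(priorities):
--             loc %= len(priorities)
--         if loc == location:
--             return i + 1
--         loc += 1
-- ===== SOURCE B (Python) =====
-- def solution(priorities, location):
--     loc = priorities.index(max(priorities))
--     n = len(priorities)
--     if 0 <= location < n:
--         return (location - loc) % n + 1
--     return None
-- ===== Notes on version B (the rewrite author's own statement) =====
-- stated objective: simpler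
-- what changed: Replaces A's cyclic counting loop (increment-and-wrap until the location is hit) with a single closed-form modular expression (location - index_of_max) % n + 1.
-- outside the precondition, e.g. on solution([3, 1, 2], 5): A returns None, B returns None; on solution([], 0): A raises ValueError, B raises ValueError
import Mathlib
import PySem

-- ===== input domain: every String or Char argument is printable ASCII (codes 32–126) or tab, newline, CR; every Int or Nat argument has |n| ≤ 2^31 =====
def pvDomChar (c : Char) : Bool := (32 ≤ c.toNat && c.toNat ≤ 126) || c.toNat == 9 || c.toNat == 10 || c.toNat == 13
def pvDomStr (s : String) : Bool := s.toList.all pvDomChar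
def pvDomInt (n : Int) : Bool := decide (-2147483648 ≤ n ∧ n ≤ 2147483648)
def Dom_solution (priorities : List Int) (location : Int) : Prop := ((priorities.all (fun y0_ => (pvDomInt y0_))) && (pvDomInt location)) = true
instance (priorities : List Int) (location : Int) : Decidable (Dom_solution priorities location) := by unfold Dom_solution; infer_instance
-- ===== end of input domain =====

-- B replaces A's cyclic counting loop with a closed-form modular expression; equal on Pre_ (nonempty list, in-range location).

-- ===== PORT A =====
-- A's `if loc >= len(priorities): loc %= len(priorities)`
def wrapA (n loc : Int) : Int := if loc ≥ n then PySem.Int.mod loc n else loc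

-- A's for-loop: fuel = remaining iterations, i = the loop counter, loc = the running cyclic index.
-- none = the loop falls off the end (Python returns None there; excluded by Pre_).
def solGoA (n location : Int) : Nat → Int → Int → Option Int
  | 0, _, _ => none
  | k+1, i, loc =>
    if wrapA n loc = location then some (i + 1)
    else solGoA n location k (i + 1) (wrapA n loc + 1)

def solution (priorities : List Int) (location : Int) : Int :=
  match PySem.List.max? priorities (fun y => y) with
  | none => 0            -- max([]) raises ValueError; excluded by Pre_
  | some m =>
    match PySem.List.index? priorities m with
    | none => 0          -- unreachable: the max is a member
    | some loc0 =>
      (solGoA (priorities.length : Int) location priorities.length 0 (loc0 : Int)).getD 0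
      -- .getD 0: the None fall-through (out-of-range location) is excluded by Pre_

-- ===== PORT B =====
def solution_alt (priorities : List Int) (location : Int) : Int :=
  match PySem.List.max? priorities (fun y => y) with
  | none => 0            -- max([]) raises ValueError; excluded by Pre_
  | some m =>
    match PySem.List.index? priorities m with
    | none => 0          -- unreachable: the max is a member
    | some loc0 =>
      if 0 ≤ location ∧ location < (priorities.length : Int)
      then PySem.Int.mod (location - (loc0 : Int)) (priorities.length : Int) + 1
      else 0             -- Python B returns None here; excluded by Pre_

-- ===== PRECONDITION & SPEC =====
-- Pre_ excludes: the empty list (max raises ValueError) and an out-of-range location,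
-- where A's loop never matches and A returns None, not an int (B returns None there too).
def Pre_solution (priorities : List Int) (location : Int) : Prop :=
  priorities ≠ [] ∧ 0 ≤ location ∧ location < (priorities.length : Int)
instance (priorities : List Int) (location : Int) : Decidable (Pre_solution priorities location) := by
  unfold Pre_solution; infer_instance

def pvWitness_solution : List Int × Int := ([2, 1, 3, 2], 2)

def Spec_solution (priorities : List Int) (location : Int) (out : Int) : Prop := out = solution_alt priorities location
instance (priorities : List Int) (location : Int) (out : Int) : Decidable (Spec_solution priorities location out) := by unfold Spec_solution; infer_instance

-- ===== CLAIM (what is proved, stated in full; the proofs are below) =====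
def Claim_equal_solution : Prop := ∀ (priorities : List Int) (location : Int), Dom_solution priorities location → Pre_solution priorities location → Spec_solution priorities location (solution priorities location)

-- ===== LEMMAS AND PROOFS =====

-- stepping the cyclic distance down by one
theorem emod_pred (n x : Int) (hn : 0 < n) (hge : 1 ≤ x % n) : (x - 1) % n = x % n - 1 := by
  have hlt : x % n < n := Int.emod_lt_of_pos x hn
  rw [Int.sub_emod, Int.emod_eq_of_lt (by omega) (by omega : (1:Int) < n)]
  exact Int.emod_eq_of_lt (by omega) (by omega)

-- the wrap step preserves the cyclic distance
theorem emod_sub_n (n location : Int) : (location - n) % n = location % n := by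
  rw [Int.sub_emod, Int.emod_self, sub_zero, Int.emod_emod_of_dvd location (dvd_refl n)]

-- Loop invariant for A's cyclic scan: with 0 ≤ loc ≤ n, 0 ≤ location < n and enough fuel,
-- the loop returns i + ((location - loc) mod n) + 1.
theorem solGoA_eq (n location : Int) (hn : 0 < n) (hl0 : 0 ≤ location) (hl1 : location < n) :
    ∀ (k : Nat) (i loc : Int), 0 ≤ loc → loc ≤ n → ((location - loc) % n).toNat < k →
      solGoA n location k i loc = some (i + (location - loc) % n + 1) := by
  intro k
  induction k with
  | zero =>
    intro i loc _ _ hfuel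
    omega
  | succ k ih =>
    intro i loc h0 h1 hfuel
    have hw : 0 ≤ wrapA n loc ∧ wrapA n loc < n ∧
        (location - wrapA n loc) % n = (location - loc) % n := by
      unfold wrapA
      split_ifs with h
      · have hloc : loc = n := by omega
        have hm : PySem.Int.mod loc n = 0 := by
          rw [hloc, PySem.Int.mod_eq_emod_of_pos hn, Int.emod_self]
        refine ⟨by omega, by omega, ?_⟩
        rw [hm, hloc, sub_zero, emod_sub_n]
      · exact ⟨h0, by omega, rfl⟩
    obtain ⟨hw0, hw1, hweq⟩ := hw
    rw [show solGoA n location (k+1) i loc =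
          (if wrapA n loc = location then some (i + 1)
           else solGoA n location k (i + 1) (wrapA n loc + 1)) from rfl,
        ← hweq]
    have hfuel' : ((location - wrapA n loc) % n).toNat < k + 1 := by rw [hweq]; exact hfuel
    by_cases heq : wrapA n loc = location
    · rw [if_pos heq, heq]
      simp
    · rw [if_neg heq]
      have hnn := Int.emod_nonneg (location - wrapA n loc) (by omega : n ≠ 0)
      have hlt := Int.emod_lt_of_pos (location - wrapA n loc) hn
      have hnz : (location - wrapA n loc) % n ≠ 0 := by
        intro h
        have hd := Int.dvd_of_emod_eq_zero h
        have := Int.eq_zero_of_dvd_of_natAbs_lt_natAbs hd (by omega)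
        exact heq (by omega)
      have hstep : (location - (wrapA n loc + 1)) % n = (location - wrapA n loc) % n - 1 := by
        rw [show location - (wrapA n loc + 1) = (location - wrapA n loc) - 1 by ring]
        exact emod_pred n (location - wrapA n loc) hn (by omega)
      rw [ih (i + 1) (wrapA n loc + 1) (by omega) (by omega) (by rw [hstep]; omega), hstep]
      -- (fuel bound: hfuel' and hnz give ((… - 1)).toNat < k)
      congr 1
      ring

-- ===== VERDICT (by name: the statement is the Claim_ definition above) =====
theorem solution_spec : Claim_equal_solution := by
  intro priorities location _hdom hpre
  obtain ⟨hne, hl0, hl1⟩ := hpre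
  unfold Spec_solution solution solution_alt
  cases hmax : PySem.List.max? priorities (fun y => y) with
  | none => exact absurd ((PySem.List.max?_eq_none_iff priorities (fun y => y)).mp hmax) hne
  | some m =>
    have hmem : m ∈ priorities := PySem.List.max?_mem hmax
    cases hidx : PySem.List.index? priorities m with
    | none => exact absurd hmem ((PySem.List.index?_eq_none_iff priorities m).mp hidx)
    | some loc0 =>
      obtain ⟨hk, -, -⟩ := PySem.List.getElem_of_index?_eq_some hidx
      have hn : 0 < (priorities.length : Int) := by omega
      have hfuel : (((location - (loc0 : Int)) % (priorities.length : Int)).toNat) < priorities.length := by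
        have h1 := Int.emod_lt_of_pos (location - (loc0 : Int)) hn
        have h2 := Int.emod_nonneg (location - (loc0 : Int)) (by omega : (priorities.length : Int) ≠ 0)
        omega
      simp only [hidx]
      rw [solGoA_eq (priorities.length : Int) location hn hl0 hl1 priorities.length 0 (loc0 : Int)
            (by omega) (by omega) hfuel]
      rw [if_pos ⟨hl0, hl1⟩, PySem.Int.mod_eq_emod_of_pos hn]
      simp
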